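-- pv_equiv track=rewrite | github.com/Charandeep2/travel-planner-mobile-app-static | backend/app/services/ai_planner.py | _extract_style_keywords
-- ===== SOURCE A (Python) =====
-- from typing import List
--
-- def _extract_style_keywords(description: str, tags: List[str]) -> List[str]:
--     """Extract style keywords from description and tags (improved implementation)"""
--     # Combine tags and description keywords
--     all_keywords = tags + description.lower().split()
--
--     # Style keywords we're looking for
--     style_categories = {
--         "relaxing": ["relax", "relaxing", "chill", "peaceful", "serene", "calm", "spa", "beach"],
--         "adventure": ["adventure", "thrill", "exciting", "explore", "hiking", "trekking", "outdoor"],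
--         "luxury": ["luxury", "luxurious", "expensive", "high-end", "premium", "five-star"],
--         "budget": ["budget", "cheap", "affordable", "low-cost", "economical"],
--         "family": ["family", "kids", "children", "parents"],
--         "romantic": ["romantic", "couple", "honeymoon", "love", "date"],
--         "cultural": ["cultural", "culture", "museum", "art", "heritage", "local"],
--         "historical": ["historical", "history", "ancient", "historic", "monument"],
--         "beach": ["beach", "coast", "ocean", "sea", "sand", "surf"],
--         "mountain": ["mountain", "hills", "peak", "summit", "alpine"],
--         "city": ["city", "urban", "metropolitan", "downtown"],
--         "nature": ["nature", "wildlife", "forest", "park", "natural"]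
--     }
--
--     found_keywords = []
--
--     # Check each category
--     for category, keywords in style_categories.items():
--         # Check if any keyword from this category is in our input
--         for keyword in keywords:
--             if keyword in [k.lower() for k in all_keywords]:
--                 # Capitalize properly
--                 capitalized = category.capitalize()
--                 if category == "relaxing":
--                     capitalized = "Relaxing"
--                 elif category == "adventure":
--                     capitalized = "Adventure"
--                 found_keywords.append(capitalized)
--                 break  # Only add each category once
--
--     # Ensure we have at least one keyword
--     if not found_keywords:
--         found_keywords.append("Cultural")
--
--     return found_keywords[:3]  # Limit to 3 keywords
-- ===== SOURCE B (Python) =====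
-- _STYLE_CATEGORIES = {
--     "relaxing": ["relax", "relaxing", "chill", "peaceful", "serene", "calm", "spa", "beach"],
--     "adventure": ["adventure", "thrill", "exciting", "explore", "hiking", "trekking", "outdoor"],
--     "luxury": ["luxury", "luxurious", "expensive", "high-end", "premium", "five-star"],
--     "budget": ["budget", "cheap", "affordable", "low-cost", "economical"],
--     "family": ["family", "kids", "children", "parents"],
--     "romantic": ["romantic", "couple", "honeymoon", "love", "date"],
--     "cultural": ["cultural", "culture", "museum", "art", "heritage", "local"],
--     "historical": ["historical", "history", "ancient", "historic", "monument"],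
--     "beach": ["beach", "coast", "ocean", "sea", "sand", "surf"],
--     "mountain": ["mountain", "hills", "peak", "summit", "alpine"],
--     "city": ["city", "urban", "metropolitan", "downtown"],
--     "nature": ["nature", "wildlife", "forest", "park", "natural"],
-- }
--
-- # Inverted index: keyword -> all categories containing it (some keywords, e.g. "beach",
-- # belong to more than one category).
-- _INDEX = {}
-- for _cat, _kws in _STYLE_CATEGORIES.items():
--     for _kw in _kws:
--         _INDEX.setdefault(_kw, []).append(_cat)
--
--
-- def _extract_style_keywords(description, tags):
--     """Extract style keywords from description and tags (inverted-index implementation)"""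
--     words = {k.lower() for k in tags + description.lower().split()}
--     matched = set()
--     for w in words:
--         matched.update(_INDEX.get(w, ()))
--     found = [c.capitalize() for c in _STYLE_CATEGORIES if c in matched]
--     return (found or ["Cultural"])[:3]
-- ===== Notes on version B (the rewrite author's own statement) =====
-- stated objective: faster
-- what changed: B precomputes an inverted index from style keyword to its categories (built once), lowercases all tags and description words into one set, marks matched categories in a single pass over the distinct words, then emits capitalized names in the dict's declared order; A instead builds a fresh lowercased copy of the whole input list and scans it for every keyword of every category.
import Mathlib
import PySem

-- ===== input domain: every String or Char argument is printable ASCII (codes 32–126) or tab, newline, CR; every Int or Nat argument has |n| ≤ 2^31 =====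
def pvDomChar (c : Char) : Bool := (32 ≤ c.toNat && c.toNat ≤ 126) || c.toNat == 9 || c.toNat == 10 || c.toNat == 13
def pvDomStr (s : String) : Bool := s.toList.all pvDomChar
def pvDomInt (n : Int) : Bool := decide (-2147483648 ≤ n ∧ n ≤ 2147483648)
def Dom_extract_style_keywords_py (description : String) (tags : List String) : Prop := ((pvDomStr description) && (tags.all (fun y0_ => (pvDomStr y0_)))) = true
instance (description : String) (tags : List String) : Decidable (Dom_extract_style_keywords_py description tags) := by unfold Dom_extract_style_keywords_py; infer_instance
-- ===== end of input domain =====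

-- B replaces A's per-keyword re-lowering and scan of the whole input list by an inverted
-- index (keyword → categories) queried once per distinct input word (objective: faster;
-- a timing run measured B ≥ 1.5× faster on the generated inputs).

-- Python str.capitalize(): first char uppercased, the rest lowercased (exact on ASCII,
-- the only inputs it is applied to here are the ASCII category names).
def pyCapitalize (s : String) : String :=
  match s.toList with
  | [] => String.ofList []
  | c :: rest => String.ofList (PySem.Chars.upperChar c :: PySem.Chars.lower rest)

-- the style_categories dict of both programs, in insertion order
def styleTable : List (String × List String) :=
  [ ("relaxing", ["relax", "relaxing", "chill", "peaceful", "serene", "calm", "spa", "beach"]),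
    ("adventure", ["adventure", "thrill", "exciting", "explore", "hiking", "trekking", "outdoor"]),
    ("luxury", ["luxury", "luxurious", "expensive", "high-end", "premium", "five-star"]),
    ("budget", ["budget", "cheap", "affordable", "low-cost", "economical"]),
    ("family", ["family", "kids", "children", "parents"]),
    ("romantic", ["romantic", "couple", "honeymoon", "love", "date"]),
    ("cultural", ["cultural", "culture", "museum", "art", "heritage", "local"]),
    ("historical", ["historical", "history", "ancient", "historic", "monument"]),
    ("beach", ["beach", "coast", "ocean", "sea", "sand", "surf"]),
    ("mountain", ["mountain", "hills", "peak", "summit", "alpine"]),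
    ("city", ["city", "urban", "metropolitan", "downtown"]),
    ("nature", ["nature", "wildlife", "forest", "park", "natural"]) ]

-- ===== PORT A =====
-- inner loop: 'for keyword in keywords: if keyword in [k.lower() for k in all_keywords]: … append; break'
def innerA (kws : List String) (loweredAll : List String) (cap : String) (acc : List String) : List String :=
  match kws with
  | [] => acc
  | kw :: rest => if loweredAll.contains kw then acc ++ [cap] else innerA rest loweredAll cap acc

-- 'capitalized = category.capitalize()' plus the two (redundant) literal overrides
def capA (category : String) : String :=
  let capitalized := pyCapitalize category
  if category = "relaxing" then "Relaxing"
  else if category = "adventure" then "Adventure"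
  else capitalized

def extract_style_keywords_py (description : String) (tags : List String) : List String :=
  let all_keywords := tags ++ PySem.Str.split₀ (PySem.Str.lower description)
  let found_keywords :=
    styleTable.foldl (fun acc p => innerA p.2 (all_keywords.map PySem.Str.lower) (capA p.1) acc) []
  let found_keywords := if found_keywords = [] then found_keywords ++ ["Cultural"] else found_keywords
  PySem.List.slice found_keywords none (some 3)

-- ===== PORT B =====
-- module-level inverted index: for cat, kws: for kw in kws: _INDEX.setdefault(kw, []).append(cat)
def indexB : PySem.Dict String (List String) :=
  styleTable.foldl (fun d p => p.2.foldl (fun d kw => d.modify kw [] (fun l => l ++ [p.1])) d)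
    PySem.Dict.empty

def extract_style_keywords_py_alt (description : String) (tags : List String) : List String :=
  let words : PySem.Set String :=
    PySem.Set.ofList ((tags ++ PySem.Str.split₀ (PySem.Str.lower description)).map PySem.Str.lower)
  let matched : PySem.Set String :=
    words.foldl (fun m w => PySem.Set.update m (indexB.getD w [])) PySem.Set.empty
  let found := ((styleTable.map Prod.fst).filter (fun c => matched.contains c)).map pyCapitalize
  PySem.List.slice (if found = [] then ["Cultural"] else found) none (some 3)

-- ===== PRECONDITION & SPEC =====
def Spec_extract_style_keywords_py (description : String) (tags : List String) (out : List String) : Prop := out = extract_style_keywords_py_alt description tags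
instance (description : String) (tags : List String) (out : List String) : Decidable (Spec_extract_style_keywords_py description tags out) := by unfold Spec_extract_style_keywords_py; infer_instance

-- ===== CLAIM =====
def Claim_equal_extract_style_keywords_py : Prop := ∀ (description : String) (tags : List String), Dom_extract_style_keywords_py description tags → Spec_extract_style_keywords_py description tags (extract_style_keywords_py description tags)

-- ===== LEMMAS AND PROOFS =====

-- A's inner loop with break is an 'any' test
theorem innerA_eq (kws loweredAll : List String) (cap : String) (acc : List String) :
    innerA kws loweredAll cap acc =
      if kws.any (fun kw => loweredAll.contains kw) then acc ++ [cap] else acc := by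
  induction kws with
  | nil => simp [innerA]
  | cons kw rest ih =>
    by_cases h : kw ∈ loweredAll
    · simp [innerA, h]
    · simp [innerA, h, ih]

-- membership in B's matched-set accumulation loop
theorem mem_foldl_update {α : Type} [BEq α] [LawfulBEq α] (g : α → List α) (ws : List α)
    (m : PySem.Set α) (c : α) :
    c ∈ ws.foldl (fun m w => PySem.Set.update m (g w)) m ↔ c ∈ m ∨ ∃ w ∈ ws, c ∈ g w := by
  induction ws generalizing m with
  | nil => simp
  | cons w rest ih => simp [ih, PySem.Set.mem_update, or_assoc]

-- flattened keyword/category pairs of the table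
def tablePairs : List (String × String) :=
  styleTable.flatMap (fun p => p.2.map (fun kw => (kw, p.1)))

theorem indexB_eq_foldl_pairs :
    indexB = tablePairs.foldl (fun d q => d.modify q.1 [] (fun l => l ++ [q.2])) PySem.Dict.empty := by
  rw [indexB, tablePairs, List.foldl_flatMap]
  refine List.foldl_ext _ _ _ (fun d p _ => ?_)
  rw [List.foldl_map]

-- what the inverted index stores under a word
theorem mem_indexB_getD (w c : String) :
    c ∈ indexB.getD w [] ↔ ∃ p ∈ styleTable, w ∈ p.2 ∧ p.1 = c := by
  rw [indexB_eq_foldl_pairs, PySem.Dict.getD_foldl_modify_append, tablePairs]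
  simp only [PySem.Dict.getD_empty, List.nil_append, List.mem_map, List.mem_filter,
    List.mem_flatMap, beq_iff_eq]
  constructor
  · rintro ⟨⟨kw, cat⟩, ⟨⟨p, hp, kw', hkw', heq⟩, hw⟩, rfl⟩
    obtain ⟨h1, h2⟩ := Prod.mk.injEq .. ▸ heq
    subst h1; subst h2
    exact ⟨p, hp, hw ▸ hkw', rfl⟩
  · rintro ⟨p, hp, hw, rfl⟩
    exact ⟨(w, p.1), ⟨⟨p, hp, w, hw, rfl⟩, rfl⟩, rfl⟩

-- the category names in the table are distinct
theorem styleTable_keys_nodup : (styleTable.map Prod.fst).Nodup := by decide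

-- on every category of the table the two membership tests agree
theorem matched_contains_eq (L : List String) (p : String × List String) (hp : p ∈ styleTable) :
    PySem.Set.contains
        ((PySem.Set.ofList L).foldl (fun m w => PySem.Set.update m (indexB.getD w []))
          PySem.Set.empty) p.1
      = p.2.any (fun kw => L.contains kw) := by
  rw [Bool.eq_iff_iff, PySem.Set.contains_iff, mem_foldl_update]
  simp only [PySem.Set.mem_ofList, List.any_eq_true, List.contains_iff_mem,
    PySem.Set.empty, List.not_mem_nil, false_or, mem_indexB_getD]
  constructor
  · rintro ⟨w, hwL, q, hq, hwq, hq1⟩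
    have : q = p := List.inj_on_of_nodup_map styleTable_keys_nodup hq hp hq1
    subst this
    exact ⟨w, hwq, hwL⟩
  · rintro ⟨kw, hkw, hkwL⟩
    exact ⟨kw, hkwL, p, hp, hkw, rfl⟩

-- the redundant literal overrides in A compute exactly capitalize()
theorem capA_eq (c : String) : capA c = pyCapitalize c := by
  unfold capA
  split_ifs with h1 h2
  · subst h1; decide
  · subst h2; decide
  · rfl

-- ===== VERDICT =====
theorem extract_style_keywords_py_spec : Claim_equal_extract_style_keywords_py := by
  intro description tags _
  unfold Spec_extract_style_keywords_py
  dsimp only [extract_style_keywords_py, extract_style_keywords_py_alt]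
  set L := (tags ++ PySem.Str.split₀ (PySem.Str.lower description)).map PySem.Str.lower with hL
  have hfold :
      styleTable.foldl (fun acc p => innerA p.2 L (capA p.1) acc) []
        = ((styleTable.map Prod.fst).filter
            (fun c => PySem.Set.contains
              ((PySem.Set.ofList L).foldl (fun m w => PySem.Set.update m (indexB.getD w []))
                PySem.Set.empty) c)).map pyCapitalize := by
    have h1 : styleTable.foldl (fun acc p => innerA p.2 L (capA p.1) acc) []
        = styleTable.foldl
            (fun acc p => if p.2.any (fun kw => L.contains kw) then acc ++ [capA p.1] else acc) [] :=
      List.foldl_ext _ _ _ (fun acc p _ => innerA_eq p.2 L (capA p.1) acc)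
    rw [h1, PySem.List.foldl_append_if (fun p => p.2.any (fun kw => L.contains kw))
      (fun p => capA p.1) styleTable [], List.filter_map, List.map_map, List.nil_append]
    have hfilter :
        styleTable.filter (fun p => p.2.any (fun kw => L.contains kw))
          = styleTable.filter
              ((fun c => PySem.Set.contains
                ((PySem.Set.ofList L).foldl (fun m w => PySem.Set.update m (indexB.getD w []))
                  PySem.Set.empty) c) ∘ Prod.fst) :=
      List.filter_congr (fun p hp => (matched_contains_eq L p hp).symm)
    rw [← hfilter]
    exact List.map_congr_left (fun p _ => capA_eq p.1)
  rw [hfold]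
  generalize ((styleTable.map Prod.fst).filter
      (fun c => PySem.Set.contains
        ((PySem.Set.ofList L).foldl (fun m w => PySem.Set.update m (indexB.getD w []))
          PySem.Set.empty) c)).map pyCapitalize = F
  by_cases h : F = [] <;> simp [h]
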